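-- pv_equiv track=rewrite | github.com/AsselNurmakhanova/prg-basics | 04-Functions/5/7/7 - 19.py | f
-- ===== SOURCE A (Python) =====
-- def f(number):
--     number = str(number)
--     count = {}
--     total = 0
--     for digit in number:
--         if digit in count:
--             count[digit] += 1
--         else:
--             count[digit] = 1
--     for digit in count:
--         if count[digit] > 1:
--             total += int(digit) * count[digit]
--     return total
-- ===== SOURCE B (Python) =====
-- def f(number):
--     # sort the characters of str(number), then scan consecutive runs;
--     # a run longer than 1 contributes int(char) * run_length.
--     s = sorted(str(number))
--     total = 0
--     i = 0
--     n = len(s)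
--     while i < n:
--         j = i + 1
--         while j < n and s[j] == s[i]:
--             j += 1
--         k = j - i
--         if k > 1:
--             total += int(s[i]) * k
--         i = j
--     return total
-- ===== Notes on version B (the rewrite author's own statement) =====
-- stated objective: alternative
-- what changed: replaces the dict-counting pass plus a second pass over the dict's keys by sorting the characters of str(number) and scanning consecutive equal runs, adding int(char)*run_length for runs longer than 1
import Mathlib
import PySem

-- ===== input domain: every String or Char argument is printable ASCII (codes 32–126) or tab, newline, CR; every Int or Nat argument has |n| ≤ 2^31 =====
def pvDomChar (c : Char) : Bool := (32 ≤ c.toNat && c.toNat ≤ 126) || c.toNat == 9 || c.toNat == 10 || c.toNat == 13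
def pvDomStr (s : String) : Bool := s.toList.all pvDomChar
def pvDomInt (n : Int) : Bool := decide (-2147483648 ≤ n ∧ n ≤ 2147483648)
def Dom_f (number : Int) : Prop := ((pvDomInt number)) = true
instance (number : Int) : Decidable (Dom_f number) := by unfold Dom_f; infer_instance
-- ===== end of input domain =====

-- B replaces A's dict-counting pass + key pass with sort-then-scan over runs (alternative algorithm, not faster).

-- ===== PORT A =====
-- int(digit): only evaluated when the digit occurs more than once, so it is a decimal digit
-- there ('-' occurs at most once in str(n)) and ofChars? never returns none; getD 0 is unreachable.
def f (number : Int) : Int :=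
  let s := PySem.Int.toChars number
  let count := s.foldl (fun d digit =>
      if d.contains digit then d.insert digit (d.getD digit 0 + 1)
      else d.insert digit 1) PySem.Dict.empty
  count.keys.foldl (fun total digit =>
      if 1 < count.getD digit 0 then
        total + (PySem.Int.ofChars? [digit]).getD 0 * count.getD digit 0
      else total) 0

-- ===== PORT B =====
-- run scan over the sorted characters: each step consumes one maximal run of equal chars
-- (the inner `while s[j] == s[i]` loop is the takeWhile, advancing i to j is the dropWhile).
def fAltGo : List Char → Int
  | [] => 0
  | c :: rest =>
      let k : Int := (rest.takeWhile (· == c)).length + 1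
      (if 1 < k then (PySem.Int.ofChars? [c]).getD 0 * k else 0) +
        fAltGo (rest.dropWhile (· == c))
termination_by l => l.length
decreasing_by
  simpa using Nat.lt_succ_of_le (List.length_dropWhile_le _ _)

def f_alt (number : Int) : Int :=
  fAltGo (PySem.List.sorted (PySem.Int.toChars number) (fun c => c) false)

-- ===== PRECONDITION & SPEC =====
def Spec_f (number : Int) (out : Int) : Prop := out = f_alt number
instance (number : Int) (out : Int) : Decidable (Spec_f number out) := by unfold Spec_f; infer_instance

-- ===== CLAIM (what is proved, stated in full; the proofs are below) =====
def Claim_equal_f : Prop := ∀ (number : Int), Dom_f number → Spec_f number (f number)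

-- ===== LEMMAS AND PROOFS =====

-- the common value: sum over the distinct chars of l (first-occurrence order) of count*int(c) when count > 1
def pvVal (c : Char) : Int := (PySem.Int.ofChars? [c]).getD 0

def pvS (l : List Char) : Int :=
  ((PySem.Set.ofList l).map (fun c =>
      if 1 < (l.count c : Int) then pvVal c * (l.count c : Int) else 0)).sum

lemma foldl_count_sum (s : List Char) :
    ∀ (l : List Char) (a : Int),
      l.foldl (fun total digit =>
          if 1 < ((s.count digit : Int)) then
            total + (PySem.Int.ofChars? [digit]).getD 0 * (s.count digit : Int)
          else total) a
        = a + (l.map (fun c =>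
            if 1 < (s.count c : Int) then pvVal c * (s.count c : Int) else 0)).sum := by
  intro l
  induction l with
  | nil => simp
  | cons x xs ih =>
      intro a
      simp only [List.foldl_cons, List.map_cons, List.sum_cons, ih, pvVal]
      split <;> ring

lemma f_eq_pvS (number : Int) : f number = pvS (PySem.Int.toChars number) := by
  have hfun : (fun (d : PySem.Dict Char Int) digit =>
      if d.contains digit then d.insert digit (d.getD digit 0 + 1)
      else d.insert digit 1)
      = fun d digit => d.insert digit (d.getD digit 0 + 1) := by
    funext d x
    by_cases h : d.contains x
    · simp [h]
    · simp [h, PySem.Dict.getD_of_not_contains d 0 (by simpa using h)]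
  simp only [f, hfun, PySem.Dict.foldl_insert_getD_add_one_eq_counter,
    PySem.Dict.keys_counter, PySem.Dict.getD_counter]
  rw [foldl_count_sum]
  simp [pvS]

-- pvS is invariant under permutation of the multiset of characters
lemma pvS_perm {l₁ l₂ : List Char} (h : l₁.Perm l₂) : pvS l₁ = pvS l₂ := by
  unfold pvS
  have hc : ∀ c, l₁.count c = l₂.count c := fun c => h.count_eq c
  have hperm : (PySem.Set.ofList l₁).Perm (PySem.Set.ofList l₂) :=
    (List.perm_ext_iff_of_nodup (PySem.Set.nodup_ofList l₁)
      (PySem.Set.nodup_ofList l₂)).mpr (fun a => by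
        simp [PySem.Set.mem_ofList, h.mem_iff])
  calc ((PySem.Set.ofList l₁).map (fun c =>
          if 1 < (l₁.count c : Int) then pvVal c * (l₁.count c : Int) else 0)).sum
      = ((PySem.Set.ofList l₁).map (fun c =>
          if 1 < (l₂.count c : Int) then pvVal c * (l₂.count c : Int) else 0)).sum := by
        simp only [hc]
    _ = _ := (hperm.map _).sum_eq

-- on a run-decomposition (head c, a run of c's, then a tail without c), Set.ofList splits off c
lemma foldl_add_notmem (xs : List Char) : ∀ (s t : List Char), (∀ x ∈ xs, x ∉ s) →
    xs.foldl PySem.Set.add (s ++ t) = s ++ xs.foldl PySem.Set.add t := by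
  induction xs with
  | nil => intro s t _; rfl
  | cons x rest ih =>
      intro s t h
      have hx : x ∉ s := h x (by simp)
      have hstep : PySem.Set.add (s ++ t) x = s ++ PySem.Set.add t x := by
        by_cases ht : x ∈ t
        · simp [PySem.Set.add, PySem.Set.contains, ht, hx]
        · simp [PySem.Set.add, PySem.Set.contains, ht, hx]
      simp only [List.foldl_cons, hstep]
      exact ih s (PySem.Set.add t x) (fun y hy => h y (by simp [hy]))

lemma foldl_add_run (run : List Char) (c : Char) (h : ∀ x ∈ run, x = c) :
    run.foldl PySem.Set.add [c] = [c] := by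
  induction run with
  | nil => rfl
  | cons x rest ih =>
      have hx : x = c := h x (by simp)
      simp only [List.foldl_cons, hx, PySem.Set.add, PySem.Set.contains]
      simpa using ih (fun y hy => h y (by simp [hy]))

lemma ofList_run_tail (c : Char) (run tail : List Char)
    (hrun : ∀ x ∈ run, x = c) (htail : c ∉ tail) :
    PySem.Set.ofList (c :: (run ++ tail)) = c :: PySem.Set.ofList tail := by
  have h0 : PySem.Set.ofList (c :: (run ++ tail))
      = tail.foldl PySem.Set.add (run.foldl PySem.Set.add [c]) := by
    simp [PySem.Set.ofList_eq_foldl, List.foldl_append]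
  rw [h0, foldl_add_run run c hrun]
  have := foldl_add_notmem tail [c] [] (fun x hx => by
    simp only [List.mem_singleton]
    rintro rfl; exact htail hx)
  simpa [PySem.Set.ofList_eq_foldl] using this

-- in a sorted list, everything after the initial run of the head is strictly greater
lemma dropWhile_gt (c : Char) : ∀ (rest : List Char),
    (c :: rest).Pairwise (· ≤ ·) → ∀ x ∈ rest.dropWhile (· == c), c < x := by
  intro rest
  induction rest with
  | nil => intro _ x hx; simp at hx
  | cons y ys ih =>
      intro hp x hx
      rcases List.pairwise_cons.mp hp with ⟨hcy, hys⟩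
      by_cases hy : y = c
      · subst hy
        rw [List.dropWhile_cons_of_pos (by simp)] at hx
        exact ih (List.pairwise_cons.mpr ⟨fun z hz => (List.pairwise_cons.mp hys).1 z hz, (List.pairwise_cons.mp hys).2⟩) x hx
      · rw [List.dropWhile_cons_of_neg (by simp [hy])] at hx
        have hcy' : c < y := lt_of_le_of_ne (hcy y (by simp)) (fun h => hy h.symm)
        rcases List.mem_cons.mp hx with rfl | hxy
        · exact hcy'
        · exact lt_of_lt_of_le hcy' ((List.pairwise_cons.mp hys).1 x hxy)

lemma fAltGo_eq_pvS : ∀ (l : List Char), l.Pairwise (· ≤ ·) → fAltGo l = pvS l := by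
  intro l
  induction l using fAltGo.induct with
  | case1 => intro _; simp [fAltGo, pvS, PySem.Set.ofList]
  | case2 c rest ih =>
      intro hp
      set run := rest.takeWhile (· == c) with hrundef
      set tail := rest.dropWhile (· == c) with htaildef
      have hrun : ∀ x ∈ run, x = c := fun x hx => by
        simpa using List.mem_takeWhile_imp hx
      have htail : ∀ x ∈ tail, c < x := dropWhile_gt c rest hp
      have hcnot : c ∉ tail := fun h => lt_irrefl c (htail c h)
      have hsplit : rest = run ++ tail := (List.takeWhile_append_dropWhile).symm
      have hptail : tail.Pairwise (· ≤ ·) :=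
        List.Pairwise.sublist (List.Sublist.cons c (List.dropWhile_sublist _)) hp
      -- counts
      have hcountc : (((c :: rest).count c : Nat) : Int) = (run.length : Int) + 1 := by
        rw [hsplit]
        have h1 : run.count c = run.length := List.count_eq_length.mpr
          (fun b hb => (hrun b hb).symm)
        have h2 : tail.count c = 0 := List.count_eq_zero.mpr hcnot
        simp [List.count_append, h1, h2]
      have hcountd : ∀ d ∈ tail, (c :: rest).count d = tail.count d := by
        intro d hd
        have hdc : d ≠ c := fun h => lt_irrefl c (h ▸ htail d hd)
        have h1 : run.count d = 0 := List.count_eq_zero.mpr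
          (fun h => hdc (hrun d h))
        simp [hsplit, List.count_append, h1, Ne.symm hdc]
      -- set decomposition
      have hset : PySem.Set.ofList (c :: rest) = c :: PySem.Set.ofList tail := by
        rw [hsplit]; exact ofList_run_tail c run tail hrun hcnot
      -- assemble
      have hgo : fAltGo (c :: rest)
          = (if 1 < ((run.length : Int) + 1) then pvVal c * ((run.length : Int) + 1) else 0)
            + fAltGo tail := by
        simp only [fAltGo, pvVal]
        rfl
      rw [hgo, ih hptail]
      unfold pvS
      rw [hset, List.map_cons, List.sum_cons, hcountc]
      congr 1
      refine congrArg List.sum (List.map_congr_left ?_)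
      intro d hd
      rw [hcountd d ((PySem.Set.mem_ofList tail d).mp hd)]

-- ===== VERDICT (by name: the statement is the Claim_ definition above) =====
theorem f_spec : Claim_equal_f := by
  intro number _
  unfold Spec_f f_alt
  rw [f_eq_pvS,
    fAltGo_eq_pvS _ (PySem.List.sorted_pairwise (PySem.Int.toChars number) (fun c => c)),
    pvS_perm (PySem.List.sorted_perm (PySem.Int.toChars number) (fun c => c) false)]
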